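-- pv_equiv track=rewrite | github.com/zsenarchitect/EA_Dist_Lite | Apps/_revit/EnneaDuck.extension/EnneadTab Tailor.tab/Proj. 2412.panel/Sparc.pulldown/update_furning_wall.pushbutton/furring_element_ops.py | _sanitize_filter_token
-- ===== SOURCE A (Python) =====
-- def _sanitize_filter_token(raw_value, fallback_value):
--     if raw_value is None:
--         token = fallback_value
--     else:
--         token = str(raw_value)
--     if token is None:
--         token = fallback_value
--     token = token.strip()
--     if not token:
--         token = fallback_value
--     replacement_pairs = [
--         ("\r", " "),
--         ("\n", " "),
--         ("\t", " "),
--     ]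
--     for search_value, replace_value in replacement_pairs:
--         token = token.replace(search_value, replace_value)
--     invalid_chars = [
--         ":", "/", "\\", "<", ">", "\"", "|", "?", "*",
--     ]
--     for char in invalid_chars:
--         token = token.replace(char, "_")
--     while "  " in token:
--         token = token.replace("  ", " ")
--     return token
-- ===== SOURCE B (Python) =====
-- def _sanitize_filter_token(raw_value, fallback_value):
--     if raw_value is None:
--         token = fallback_value
--     else:
--         token = str(raw_value)
--     if token is None:
--         token = fallback_value
--     token = token.strip()
--     if not token:
--         token = fallback_value
--     out = []
--     for ch in token:
--         if ch in "\r\n\t":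
--             ch = " "
--         elif ch in ":/\\<>\"|?*":
--             ch = "_"
--         if ch == " " and out and out[-1] == " ":
--             continue
--         out.append(ch)
--     return "".join(out)
-- ===== Notes on version B (the rewrite author's own statement) =====
-- stated objective: alternative
-- what changed: Replaced the eleven full-string str.replace passes plus the repeated while-loop double-space collapse with a single left-to-right pass that maps each character and skips a space whose previously emitted character is a space; it trades A's multiple C-level passes for one O(n) scan (fewer passes, but not measurably faster in CPython).
import Mathlib
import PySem

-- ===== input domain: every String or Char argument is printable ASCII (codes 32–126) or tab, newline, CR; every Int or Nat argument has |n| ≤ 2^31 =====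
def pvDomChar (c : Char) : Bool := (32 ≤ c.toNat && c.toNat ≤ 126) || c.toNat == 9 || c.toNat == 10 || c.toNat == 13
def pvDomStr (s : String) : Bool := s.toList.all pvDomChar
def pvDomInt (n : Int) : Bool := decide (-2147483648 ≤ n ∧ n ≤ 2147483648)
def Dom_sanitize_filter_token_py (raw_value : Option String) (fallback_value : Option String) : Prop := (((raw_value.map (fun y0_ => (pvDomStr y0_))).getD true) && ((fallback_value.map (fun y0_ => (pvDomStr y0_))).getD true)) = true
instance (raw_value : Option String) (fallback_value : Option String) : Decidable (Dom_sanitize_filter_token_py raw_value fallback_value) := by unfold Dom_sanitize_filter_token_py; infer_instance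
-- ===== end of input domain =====

-- B replaces A's eleven str.replace passes and the while-loop double-space collapse with one
-- left-to-right pass that maps each character and skips a space after an emitted space
-- (objective: alternative single-pass algorithm; not measurably faster in CPython).

-- ===== PORT A =====
-- Helpers needed BY THE PORT itself: pvRep2/pvHasDD and the lemmas below establish the
-- decreasing measure `pvReplaceDD_lt` cited by `decreasing_by` of A's
-- `while "  " in token:` loop.  The port does not compute with them.

/-- what one pass of Python's `s.replace("  ", " ")` computes (proved in `pvReplace_dd`). -/
def pvRep2 : List Char → List Char
  | [] => []
  | [c] => [c]
  | c :: d :: t => if c = ' ' ∧ d = ' ' then ' ' :: pvRep2 t else c :: pvRep2 (d :: t)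

/-- `"  " in l`: some two adjacent characters are both spaces. -/
def pvHasDD : List Char → Bool
  | [] => false
  | [_] => false
  | c :: d :: t => (c == ' ' && d == ' ') || pvHasDD (d :: t)

theorem pvReplace_go_dd (fuel : Nat) : ∀ (l acc : List Char), l.length ≤ fuel →
    PySem.Chars.replace.go [' ', ' '] [' '] fuel l acc = acc.reverse ++ pvRep2 l := by
  induction fuel with
  | zero =>
    intro l acc h
    have : l = [] := List.eq_nil_of_length_eq_zero (Nat.le_zero.mp h)
    subst this; simp [pvRep2, PySem.Chars.replace.go]
  | succ n ih =>
    intro l acc h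
    match l with
    | [] => simp [pvRep2, PySem.Chars.replace.go]
    | [c] =>
      have hpre : List.isPrefixOf [' ', ' '] [c] = false := by simp [List.isPrefixOf]
      show (if List.isPrefixOf [' ', ' '] [c] then _ else PySem.Chars.replace.go _ _ n [] (c :: acc)) = _
      rw [hpre]
      simp only [Bool.false_eq_true, if_false]
      rw [ih [] (c :: acc) (by simp)]
      simp [pvRep2]
    | c :: d :: t =>
      have hpre : List.isPrefixOf [' ', ' '] (c :: d :: t) = (' ' == c && ' ' == d) := by
        simp [List.isPrefixOf]
      show (if List.isPrefixOf [' ', ' '] (c :: d :: t) then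
              PySem.Chars.replace.go [' ',' '] [' '] n (List.drop 2 (c :: d :: t)) ([' '].reverse ++ acc)
            else PySem.Chars.replace.go [' ',' '] [' '] n (d :: t) (c :: acc)) = _
      rw [hpre]
      simp only [List.length_cons] at h
      by_cases hdd : c = ' ' ∧ d = ' '
      · rw [if_pos (by simp [hdd.1, hdd.2])]
        simp only [List.drop]
        rw [ih t ([' '].reverse ++ acc) (by omega)]
        simp [pvRep2, hdd.1, hdd.2]
      · rw [if_neg (by simp only [Bool.and_eq_true, beq_iff_eq]; exact fun hc => hdd ⟨hc.1.symm, hc.2.symm⟩)]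
        rw [ih (d :: t) (c :: acc) (by simp; omega)]
        simp [pvRep2, hdd]

theorem pvReplace_dd (cs : List Char) :
    PySem.Chars.replace cs [' ', ' '] [' '] = pvRep2 cs := by
  unfold PySem.Chars.replace
  simp only [List.isEmpty_cons, Bool.false_eq_true, if_false]
  simpa using pvReplace_go_dd cs.length cs [] le_rfl

theorem pvHasDD_iff (l : List Char) : pvHasDD l = true ↔ [' ', ' '] <:+: l := by
  induction l with
  | nil => simp [pvHasDD]
  | cons c t ih =>
    cases t with
    | nil =>
      simp only [pvHasDD, Bool.false_eq_true, false_iff]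
      intro hinf
      have := hinf.length_le
      simp at this
    | cons d t' =>
      simp only [pvHasDD, Bool.or_eq_true, Bool.and_eq_true, beq_iff_eq]
      rw [List.infix_cons_iff (a := c) (l₂ := d :: t'), ih]
      constructor
      · rintro (⟨rfl, rfl⟩ | hinf)
        · exact Or.inl (List.cons_prefix_cons.mpr ⟨rfl, List.cons_prefix_cons.mpr ⟨rfl, List.nil_prefix⟩⟩)
        · exact Or.inr hinf
      · rintro (hpre | hinf)
        · obtain ⟨h1, hpre'⟩ := List.cons_prefix_cons.mp hpre
          obtain ⟨h2, _⟩ := List.cons_prefix_cons.mp hpre'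
          exact Or.inl ⟨h1.symm, h2.symm⟩
        · exact Or.inr hinf

theorem pvRep2_length_le (l : List Char) : (pvRep2 l).length ≤ l.length := by
  induction l using pvRep2.induct with
  | case1 => simp [pvRep2]
  | case2 c => simp [pvRep2]
  | case3 c d t h ih => simp only [pvRep2, if_pos h]; simp at ih ⊢; omega
  | case4 c d t h ih => simp only [pvRep2, if_neg h]; simp at ih ⊢; omega

theorem pvRep2_length_lt (l : List Char) (h : pvHasDD l = true) : (pvRep2 l).length < l.length := by
  induction l using pvRep2.induct with
  | case1 => simp [pvHasDD] at h
  | case2 c => simp [pvHasDD] at h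
  | case3 c d t hdd ih =>
    have := pvRep2_length_le t
    simp only [pvRep2, if_pos hdd]
    simp at this ⊢
    omega
  | case4 c d t hdd ih =>
    simp only [pvHasDD, Bool.or_eq_true, Bool.and_eq_true, beq_iff_eq] at h
    rcases h with ⟨h1, h2⟩ | h
    · exact absurd ⟨h1, h2⟩ hdd
    · have := ih h
      simp only [pvRep2, if_neg hdd]
      simp at this ⊢
      omega

/-- termination measure for A's `while "  " in token:` loop. -/
theorem pvReplaceDD_lt (s : String) (h : PySem.Str.isIn "  " s = true) :
    (PySem.Str.replace s "  " " ").toList.length < s.toList.length := by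
  have hdd : pvHasDD s.toList = true := by
    rw [pvHasDD_iff]
    exact (PySem.Str.isIn_iff_infix _ _).mp h
  have hrw : (PySem.Str.replace s "  " " ").toList = pvRep2 s.toList := by
    simp only [PySem.Str.toList_replace]
    exact pvReplace_dd s.toList
  rw [hrw]
  exact pvRep2_length_lt _ hdd

/-- `while "  " in token: token = token.replace("  ", " ")` -/
def pvCollapseWhile (s : String) : String :=
  if PySem.Str.isIn "  " s then pvCollapseWhile (PySem.Str.replace s "  " " ") else s
termination_by s.toList.length
decreasing_by exact pvReplaceDD_lt s (by assumption)

def sanitize_filter_token_py (raw_value : Option String) (fallback_value : Option String) : String :=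
  let token : Option String := match raw_value with
    | none => fallback_value
    | some s => some s          -- str(raw_value): raw_value is already a string
  let token : Option String := match token with
    | none => fallback_value
    | some s => some s
  match token with
  | none => ""                  -- Python raises AttributeError (None.strip()); excluded by Pre_
  | some t =>
    let t := PySem.Str.strip t
    match (if t = "" then fallback_value else some t) with
    | none => ""                -- Python raises AttributeError (None.replace); excluded by Pre_
    | some t =>
      let t := [("\r", " "), ("\n", " "), ("\t", " ")].foldl
        (fun s p => PySem.Str.replace s p.1 p.2) t
      let t := [":", "/", "\\", "<", ">", "\"", "|", "?", "*"].foldl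
        (fun s c => PySem.Str.replace s c "_") t
      pvCollapseWhile t

-- ===== PORT B =====
def pvMapChar (c : Char) : Char :=
  if c = '\r' ∨ c = '\n' ∨ c = '\t' then ' '
  else if c ∈ [':', '/', '\\', '<', '>', '"', '|', '?', '*'] then '_'
  else c

def sanitize_filter_token_py_alt (raw_value : Option String) (fallback_value : Option String) : String :=
  let token : Option String := match raw_value with
    | none => fallback_value
    | some s => some s
  let token : Option String := match token with
    | none => fallback_value
    | some s => some s
  match token with
  | none => ""                  -- Python raises here as A does; excluded by Pre_
  | some t =>
    let t := PySem.Str.strip t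
    match (if t = "" then fallback_value else some t) with
    | none => ""                -- Python raises here as A does; excluded by Pre_
    | some t =>
      String.ofList (t.toList.foldl (fun out c =>
        if pvMapChar c = ' ' ∧ out ≠ [] ∧ out.getLast? = some ' ' then out
        else out ++ [pvMapChar c]) [])

-- ===== PRECONDITION & SPEC =====
-- Pre_ excludes exactly the inputs on which the Python A raises AttributeError (the token
-- resolves to None): fallback_value is None while raw_value is None or strips to empty.
def Pre_sanitize_filter_token_py (raw_value : Option String) (fallback_value : Option String) : Prop :=
  fallback_value.isSome = true ∨ (raw_value.map (fun s => PySem.Str.strip s)).getD "" ≠ ""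
instance (raw_value : Option String) (fallback_value : Option String) : Decidable (Pre_sanitize_filter_token_py raw_value fallback_value) := by unfold Pre_sanitize_filter_token_py; infer_instance

def pvWitness_sanitize_filter_token_py : Option String × Option String := (some "a b", none)

def Spec_sanitize_filter_token_py (raw_value : Option String) (fallback_value : Option String) (out : String) : Prop := out = sanitize_filter_token_py_alt raw_value fallback_value
instance (raw_value : Option String) (fallback_value : Option String) (out : String) : Decidable (Spec_sanitize_filter_token_py raw_value fallback_value out) := by unfold Spec_sanitize_filter_token_py; infer_instance

-- ===== CLAIM (what is proved, stated in full; the proofs are below) =====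
def Claim_equal_sanitize_filter_token_py : Prop := ∀ (raw_value : Option String) (fallback_value : Option String), Dom_sanitize_filter_token_py raw_value fallback_value → Pre_sanitize_filter_token_py raw_value fallback_value → Spec_sanitize_filter_token_py raw_value fallback_value (sanitize_filter_token_py raw_value fallback_value)

-- ===== LEMMAS AND PROOFS =====

/-- the one-pass collapse, recursively: drop a space whose previously kept character is a space. -/
def pvCrec : Option Char → List Char → List Char
  | _, [] => []
  | p, c :: t => if c = ' ' ∧ p = some ' ' then pvCrec p t else c :: pvCrec (some c) t

/-- B's fold, characterised: it appends the collapse of the mapped characters. -/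
theorem pvFoldMap_crec (l : List Char) : ∀ out : List Char,
    l.foldl (fun out c =>
        if pvMapChar c = ' ' ∧ out ≠ [] ∧ out.getLast? = some ' ' then out
        else out ++ [pvMapChar c]) out
      = out ++ pvCrec out.getLast? (l.map pvMapChar) := by
  induction l with
  | nil => intro out; simp [pvCrec]
  | cons c t ih =>
    intro out
    simp only [List.foldl_cons, List.map_cons]
    by_cases h : pvMapChar c = ' ' ∧ out.getLast? = some ' '
    · have hne : out ≠ [] := by rintro rfl; simp at h
      rw [if_pos ⟨h.1, hne, h.2⟩, ih out]
      simp only [pvCrec, if_pos h]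
    · have hcond : ¬ (pvMapChar c = ' ' ∧ out ≠ [] ∧ out.getLast? = some ' ') := by tauto
      rw [if_neg hcond, ih (out ++ [pvMapChar c])]
      simp only [pvCrec, if_neg h, List.getLast?_append_cons, List.getLast?_singleton]
      simp

theorem pvCrec_rep2 (n : Nat) : ∀ (l : List Char) (p : Option Char), l.length ≤ n →
    pvCrec p (pvRep2 l) = pvCrec p l := by
  induction n with
  | zero =>
    intro l p h
    have : l = [] := List.eq_nil_of_length_eq_zero (Nat.le_zero.mp h)
    subst this; simp [pvRep2]
  | succ n ih =>
    intro l p h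
    match l with
    | [] => rfl
    | [c] => rfl
    | c :: d :: t =>
      simp only [List.length_cons] at h
      by_cases hdd : c = ' ' ∧ d = ' '
      · obtain ⟨rfl, rfl⟩ := hdd
        by_cases hp : p = some ' '
        · subst hp
          simp [pvRep2, pvCrec]
          exact ih t (some ' ') (by omega)
        · simp [pvRep2, pvCrec, hp]
          exact ih t (some ' ') (by omega)
      · simp only [pvRep2, if_neg hdd]
        by_cases hp : c = ' ' ∧ p = some ' '
        · simp only [pvCrec, if_pos hp, ih (d :: t) p (by simp; omega)]
        · simp only [pvCrec, if_neg hp, ih (d :: t) (some c) (by simp; omega)]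

theorem pvCrec_id (l : List Char) : ∀ p : Option Char, pvHasDD l = false →
    (p = some ' ' → l.head? ≠ some ' ') → pvCrec p l = l := by
  induction l with
  | nil => intro p _ _; simp [pvCrec]
  | cons c t ih =>
    intro p hdd hhd
    have hcp : ¬ (c = ' ' ∧ p = some ' ') := by
      rintro ⟨rfl, rfl⟩
      exact hhd rfl rfl
    simp only [pvCrec, if_neg hcp]
    have htdd : pvHasDD t = false := by
      match t with
      | [] => simp [pvHasDD]
      | d :: t' =>
        simp only [pvHasDD, Bool.or_eq_false_iff] at hdd
        exact hdd.2
    have hthd : (some c : Option Char) = some ' ' → t.head? ≠ some ' ' := by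
      intro hc
      simp only [Option.some.injEq] at hc
      subst hc
      match t with
      | [] => simp
      | d :: t' =>
        simp only [pvHasDD, Bool.or_eq_false_iff, Bool.and_eq_false_iff] at hdd
        simp only [List.head?_cons, ne_eq, Option.some.injEq]
        rcases hdd.1 with h | h <;> simp_all
    rw [ih (some c) htdd hthd]

theorem pvCollapseWhile_eq (s : String) :
    pvCollapseWhile s = String.ofList (pvCrec none s.toList) := by
  rw [pvCollapseWhile]
  by_cases h : PySem.Str.isIn "  " s = true
  · rw [if_pos h, pvCollapseWhile_eq (PySem.Str.replace s "  " " ")]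
    congr 1
    have hrw : (PySem.Str.replace s "  " " ").toList = pvRep2 s.toList := by
      simp only [PySem.Str.toList_replace]
      exact pvReplace_dd s.toList
    rw [hrw]
    exact pvCrec_rep2 s.toList.length s.toList none le_rfl
  · rw [if_neg h]
    have hdd : pvHasDD s.toList = false := by
      rw [← Bool.not_eq_true, pvHasDD_iff]
      intro hinf
      exact h ((PySem.Str.isIn_iff_infix _ _).mpr hinf)
    rw [pvCrec_id s.toList none hdd (by simp)]
    exact String.ofList_toList.symm
termination_by s.toList.length
decreasing_by exact pvReplaceDD_lt s h

/-- what one single-character `s.replace(a, b)` does to one character. -/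
def pvF (a b : Char) (c : Char) : Char := if c = a then b else c

theorem pvReplace_single (s old new : String) (a b : Char)
    (ho : old.toList = [a]) (hn : new.toList = [b]) :
    (PySem.Str.replace s old new).toList = s.toList.map (pvF a b) := by
  simp only [PySem.Str.toList_replace, ho, hn]
  show PySem.Chars.replace s.toList [a] [b] = _
  unfold PySem.Chars.replace
  simp only [List.isEmpty_cons, Bool.false_eq_true, if_false]
  suffices hgo : ∀ (fuel : Nat) (l acc : List Char), l.length ≤ fuel →
      PySem.Chars.replace.go [a] [b] fuel l acc
        = acc.reverse ++ l.map (pvF a b) by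
    simpa using hgo s.toList.length s.toList [] le_rfl
  intro fuel
  induction fuel with
  | zero =>
    intro l acc h
    have : l = [] := List.eq_nil_of_length_eq_zero (Nat.le_zero.mp h)
    subst this; simp [PySem.Chars.replace.go]
  | succ n ih =>
    intro l acc h
    match l with
    | [] => simp [PySem.Chars.replace.go]
    | c :: t =>
      have hpre : List.isPrefixOf [a] (c :: t) = (a == c) := by simp [List.isPrefixOf]
      show (if List.isPrefixOf [a] (c :: t) then
              PySem.Chars.replace.go [a] [b] n (List.drop 1 (c :: t)) ([b].reverse ++ acc)
            else PySem.Chars.replace.go [a] [b] n t (c :: acc)) = _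
      rw [hpre]
      simp only [List.length_cons] at h
      by_cases hca : c = a
      · rw [if_pos (by simp [hca])]
        simp only [List.drop]
        rw [ih t ([b].reverse ++ acc) (by omega)]
        simp [pvF, hca]
      · rw [if_neg (by simp only [beq_iff_eq]; exact fun hc => hca hc.symm)]
        rw [ih t (c :: acc) (by omega)]
        simp [pvF, hca]

theorem pvMapChain (c : Char) :
    pvF '*' '_' (pvF '?' '_' (pvF '|' '_' (pvF '"' '_' (pvF '>' '_' (pvF '<' '_'
      (pvF '\\' '_' (pvF '/' '_' (pvF ':' '_' (pvF '\t' ' ' (pvF '\n' ' '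
      (pvF '\r' ' ' c)))))))))))
      = pvMapChar c := by
  by_cases h : c ∈ ['\r', '\n', '\t', ':', '/', '\\', '<', '>', '"', '|', '?', '*']
  · fin_cases h <;> rfl
  · simp only [List.mem_cons, List.not_mem_nil, or_false, not_or] at h
    obtain ⟨h1, h2, h3, h4, h5, h6, h7, h8, h9, h10, h11, h12⟩ := h
    have hA : ¬ (c = '\r' ∨ c = '\n' ∨ c = '\t') := by tauto
    have hB : c ∉ [':', '/', '\\', '<', '>', '"', '|', '?', '*'] := by
      simp only [List.mem_cons, List.not_mem_nil, or_false, not_or]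
      tauto
    rw [show pvF '\r' ' ' c = c by rw [pvF, if_neg h1]]
    rw [show pvF '\n' ' ' c = c by rw [pvF, if_neg h2]]
    rw [show pvF '\t' ' ' c = c by rw [pvF, if_neg h3]]
    rw [show pvF ':' '_' c = c by rw [pvF, if_neg h4]]
    rw [show pvF '/' '_' c = c by rw [pvF, if_neg h5]]
    rw [show pvF '\\' '_' c = c by rw [pvF, if_neg h6]]
    rw [show pvF '<' '_' c = c by rw [pvF, if_neg h7]]
    rw [show pvF '>' '_' c = c by rw [pvF, if_neg h8]]
    rw [show pvF '"' '_' c = c by rw [pvF, if_neg h9]]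
    rw [show pvF '|' '_' c = c by rw [pvF, if_neg h10]]
    rw [show pvF '?' '_' c = c by rw [pvF, if_neg h11]]
    rw [show pvF '*' '_' c = c by rw [pvF, if_neg h12]]
    rw [pvMapChar, if_neg hA, if_neg hB]

theorem pvMapListChain (l : List Char) :
    List.map (pvF '*' '_') (List.map (pvF '?' '_') (List.map (pvF '|' '_')
      (List.map (pvF '"' '_') (List.map (pvF '>' '_') (List.map (pvF '<' '_')
      (List.map (pvF '\\' '_') (List.map (pvF '/' '_') (List.map (pvF ':' '_')
      (List.map (pvF '\t' ' ') (List.map (pvF '\n' ' ')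
      (List.map (pvF '\r' ' ') l)))))))))))
      = l.map pvMapChar := by
  induction l with
  | nil => simp
  | cons c t ih =>
    simp only [List.map_cons]
    rw [pvMapChain c, ih]

/-- the common tail of the two ports: A's replace chain + while-collapse equals B's single fold. -/
theorem pvCore (u : String) :
    pvCollapseWhile
      ([":", "/", "\\", "<", ">", "\"", "|", "?", "*"].foldl
        (fun s c => PySem.Str.replace s c "_")
        ([("\r", " "), ("\n", " "), ("\t", " ")].foldl
          (fun s p => PySem.Str.replace s p.1 p.2) u))
      = String.ofList (u.toList.foldl (fun out c =>
          if pvMapChar c = ' ' ∧ out ≠ [] ∧ out.getLast? = some ' ' then out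
          else out ++ [pvMapChar c]) []) := by
  simp only [List.foldl_cons, List.foldl_nil]
  rw [pvCollapseWhile_eq]
  have hmaps :
      (PySem.Str.replace (PySem.Str.replace (PySem.Str.replace (PySem.Str.replace
        (PySem.Str.replace (PySem.Str.replace (PySem.Str.replace (PySem.Str.replace
        (PySem.Str.replace (PySem.Str.replace (PySem.Str.replace (PySem.Str.replace u
          "\r" " ") "\n" " ") "\t" " ") ":" "_") "/" "_") "\\" "_") "<" "_") ">" "_")
          "\"" "_") "|" "_") "?" "_") "*" "_").toList
        = u.toList.map pvMapChar := by
    rw [pvReplace_single _ "*" "_" '*' '_' rfl rfl,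
        pvReplace_single _ "?" "_" '?' '_' rfl rfl,
        pvReplace_single _ "|" "_" '|' '_' rfl rfl,
        pvReplace_single _ "\"" "_" '"' '_' rfl rfl,
        pvReplace_single _ ">" "_" '>' '_' rfl rfl,
        pvReplace_single _ "<" "_" '<' '_' rfl rfl,
        pvReplace_single _ "\\" "_" '\\' '_' rfl rfl,
        pvReplace_single _ "/" "_" '/' '_' rfl rfl,
        pvReplace_single _ ":" "_" ':' '_' rfl rfl,
        pvReplace_single _ "\t" " " '\t' ' ' rfl rfl,
        pvReplace_single _ "\n" " " '\n' ' ' rfl rfl,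
        pvReplace_single _ "\r" " " '\r' ' ' rfl rfl]
    exact pvMapListChain u.toList
  rw [hmaps, pvFoldMap_crec u.toList []]
  simp

-- ===== VERDICT (by name: the statement is the Claim_ definition above) =====
set_option maxHeartbeats 1600000 in
theorem sanitize_filter_token_py_spec : Claim_equal_sanitize_filter_token_py := by
  intro raw_value fallback_value _ _
  unfold Spec_sanitize_filter_token_py sanitize_filter_token_py sanitize_filter_token_py_alt
  cases raw_value with
  | none =>
    cases fallback_value with
    | none => rfl
    | some f =>
      by_cases hf : PySem.Str.strip f = ""
      · simp only [if_pos hf]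
        exact pvCore f
      · simp only [if_neg hf]
        exact pvCore (PySem.Str.strip f)
  | some s =>
    by_cases hs : PySem.Str.strip s = ""
    · simp only [if_pos hs]
      cases fallback_value with
      | none => rfl
      | some f => exact pvCore f
    · simp only [if_neg hs]
      exact pvCore (PySem.Str.strip s)
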